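-- pv_equiv track=rewrite | github.com/hexsean/firearm_vision | config_formatter.py | preserve_screenshot_area_order
-- ===== SOURCE A (Python) =====
-- from collections import OrderedDict
-- from typing import Dict, Any
--
-- def preserve_screenshot_area_order(area_data: Dict[str, Any]) -> OrderedDict:
--     """保持截图区域的标准顺序：left, top, width, height"""
--     ordered = OrderedDict()
--     standard_order = ['left', 'top', 'width', 'height']
--
--     # 按标准顺序添加
--     for field in standard_order:
--         if field in area_data:
--             ordered[field] = area_data[field]
--
--     # 添加其他字段
--     for field, value in area_data.items():
--         if field not in ordered:
--             ordered[field] = value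
--
--     return ordered
-- ===== SOURCE B (Python) =====
-- from collections import OrderedDict
-- from typing import Dict, Any
--
-- def preserve_screenshot_area_order(area_data: Dict[str, Any]) -> OrderedDict:
--     """保持截图区域的标准顺序：left, top, width, height"""
--     standard_order = ['left', 'top', 'width', 'height']
--     rank = {field: i for i, field in enumerate(standard_order)}
--     fallback = len(standard_order)
--     return OrderedDict(sorted(area_data.items(), key=lambda item: rank.get(item[0], fallback)))
-- ===== Notes on version B (the rewrite author's own statement) =====
-- stated objective: idiomatic
-- what changed: A's two sequential passes (populate standard keys from the dict, then append the remaining items) are replaced by a single stable sort of area_data.items() under a rank key (standard keys get their index 0..3, all other keys 4), wrapped back into an OrderedDict.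
import Mathlib
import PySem

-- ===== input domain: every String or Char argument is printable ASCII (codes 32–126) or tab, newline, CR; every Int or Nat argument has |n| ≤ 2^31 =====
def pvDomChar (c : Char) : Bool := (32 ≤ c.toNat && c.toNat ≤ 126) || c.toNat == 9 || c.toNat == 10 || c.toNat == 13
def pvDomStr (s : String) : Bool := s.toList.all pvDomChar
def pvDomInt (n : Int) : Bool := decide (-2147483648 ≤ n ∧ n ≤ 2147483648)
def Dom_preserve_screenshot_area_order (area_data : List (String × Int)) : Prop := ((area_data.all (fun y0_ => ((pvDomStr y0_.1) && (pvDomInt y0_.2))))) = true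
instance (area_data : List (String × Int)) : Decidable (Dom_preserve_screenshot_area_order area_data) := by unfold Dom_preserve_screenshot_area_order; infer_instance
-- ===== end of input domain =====

-- B replaces A's two populate/append passes over the dict by one stable sort of the items
-- under a rank key (standard keys 0..3, all others 4); objective: idiomatic, not faster.


-- ===== PORT A =====
def preserve_screenshot_area_order (area_data : List (String × Int)) : List (String × Int) :=
  let d := PySem.Dict.mk area_data
  let standard_order := ["left", "top", "width", "height"]
  -- for field in standard_order: if field in area_data: ordered[field] = area_data[field]
  let ordered := standard_order.foldl (fun o f =>
      match d.get? f with
      | some v => o.insert f v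
      | none => o) PySem.Dict.empty
  -- for field, value in area_data.items(): if field not in ordered: ordered[field] = value
  let ordered2 := area_data.foldl (fun o p =>
      if o.contains p.1 then o else o.insert p.1 p.2) ordered
  ordered2.items

-- ===== PORT B =====
def preserve_screenshot_area_order_alt (area_data : List (String × Int)) : List (String × Int) :=
  let standard_order := ["left", "top", "width", "height"]
  let rank := PySem.Dict.ofList ((PySem.List.enumerate standard_order).map (fun p => (p.2, p.1)))
  let fallback : Int := standard_order.length
  (PySem.Dict.ofList (PySem.List.sorted area_data (fun item => rank.getD item.1 fallback) false)).items

-- ===== PRECONDITION & SPEC =====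
-- Pre_ requires pairwise-distinct keys: a Python dict cannot contain duplicate keys, so a
-- duplicate-key association list does not represent any input A accepts.
def Pre_preserve_screenshot_area_order (area_data : List (String × Int)) : Prop :=
  (area_data.map Prod.fst).Nodup
instance (area_data : List (String × Int)) : Decidable (Pre_preserve_screenshot_area_order area_data) := by unfold Pre_preserve_screenshot_area_order; infer_instance
def pvWitness_preserve_screenshot_area_order : (List (String × Int)) := [("top", 3), ("foo", 7), ("left", 1)]

def Spec_preserve_screenshot_area_order (area_data : List (String × Int)) (out : List (String × Int)) : Prop := out = preserve_screenshot_area_order_alt area_data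
instance (area_data : List (String × Int)) (out : List (String × Int)) : Decidable (Spec_preserve_screenshot_area_order area_data out) := by unfold Spec_preserve_screenshot_area_order; infer_instance

-- ===== CLAIM (what is proved, stated in full; the proofs are below) =====
def Claim_equal_preserve_screenshot_area_order : Prop := ∀ (area_data : List (String × Int)), Dom_preserve_screenshot_area_order area_data → Pre_preserve_screenshot_area_order area_data → Spec_preserve_screenshot_area_order area_data (preserve_screenshot_area_order area_data)

-- ===== LEMMAS AND PROOFS =====

-- the rank B's key dictionary computes, written as a plain function
def rk (s : String) : Int :=
  if s = "left" then 0 else if s = "top" then 1 else if s = "width" then 2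
  else if s = "height" then 3 else 4

set_option maxRecDepth 16384 in
lemma rank_getD (s : String) :
    (PySem.Dict.ofList ((PySem.List.enumerate ["left", "top", "width", "height"]).map
        (fun p => (p.2, p.1)))).getD s ((["left", "top", "width", "height"] : List String).length : Int)
      = rk s := by
  have h : (PySem.Dict.ofList ((PySem.List.enumerate ["left", "top", "width", "height"]).map
      (fun p => (p.2, p.1)))) = PySem.Dict.mk [("left", 0), ("top", 1), ("width", 2), ("height", 3)] := by rfl
  have hnil : (PySem.Dict.mk ([] : List (String × Int))).get? s = none := by simp [PySem.Dict.get?]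
  rw [h, show ((["left", "top", "width", "height"] : List String).length : Int) = 4 from rfl,
      PySem.Dict.getD_eq_get?_getD, PySem.Dict.get?_mk_cons, PySem.Dict.get?_mk_cons,
      PySem.Dict.get?_mk_cons, PySem.Dict.get?_mk_cons, hnil]
  unfold rk
  simp only [beq_iff_eq]
  by_cases h1 : "left" = s <;> by_cases h2 : "top" = s <;> by_cases h3 : "width" = s <;>
    by_cases h4 : "height" = s <;> simp [h1, h2, h3, h4] <;> simp_all [eq_comm]

lemma rk_mem (s : String) : rk s = 0 ∨ rk s = 1 ∨ rk s = 2 ∨ rk s = 3 ∨ rk s = 4 := by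
  unfold rk; split_ifs <;> simp

lemma rk_eq_zero (s : String) : (rk s == 0) = (s == "left") := by
  unfold rk; split_ifs <;> simp_all
lemma rk_eq_one (s : String) : (rk s == 1) = (s == "top") := by
  unfold rk; split_ifs <;> simp_all
lemma rk_eq_two (s : String) : (rk s == 2) = (s == "width") := by
  unfold rk; split_ifs <;> simp_all
lemma rk_eq_three (s : String) : (rk s == 3) = (s == "height") := by
  unfold rk; split_ifs <;> simp_all
lemma rk_eq_four (s : String) :
    (rk s == 4) = !(decide (s ∈ (["left", "top", "width", "height"] : List String))) := by
  unfold rk; split_ifs <;> simp_all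

lemma insertBy_cons (b : (String × Int) → (String × Int) → Bool) (x y : String × Int) (ys : List (String × Int)) :
    PySem.List.insertBy b x (y :: ys) = if b x y then x :: y :: ys else y :: PySem.List.insertBy b x ys := rfl

lemma insertBy_append_left (b : (String × Int) → (String × Int) → Bool) (x : String × Int)
    (l1 l2 : List (String × Int)) (h : ∀ y ∈ l1, b x y = false) :
    PySem.List.insertBy b x (l1 ++ l2) = l1 ++ PySem.List.insertBy b x l2 := by
  induction l1 with
  | nil => simp
  | cons y t ih =>
      have hy := h y (by simp)
      simp only [List.cons_append]
      rw [insertBy_cons, if_neg (by simp [hy]), ih (fun z hz => h z (by simp [hz]))]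

lemma insertBy_all_before (b : (String × Int) → (String × Int) → Bool) (x : String × Int)
    (l : List (String × Int)) (h : ∀ y ∈ l, b x y = true) :
    PySem.List.insertBy b x l = x :: l := by
  cases l with
  | nil => rfl
  | cons y t => rw [insertBy_cons, if_pos (h y (by simp))]

-- the stable sort under the rank key is the concatenation of the five rank buckets
lemma sorted_buckets (xs : List (String × Int)) :
    PySem.List.sorted xs (fun p => rk p.1) false =
      xs.filter (fun p => rk p.1 == 0) ++ xs.filter (fun p => rk p.1 == 1) ++
      xs.filter (fun p => rk p.1 == 2) ++ xs.filter (fun p => rk p.1 == 3) ++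
      xs.filter (fun p => rk p.1 == 4) := by
  rw [PySem.List.sorted_eq_foldl_insertBy]
  induction xs using List.reverseRecOn with
  | nil => simp
  | append_singleton xs x ih =>
      rw [List.foldl_append, List.foldl_cons, List.foldl_nil, ih]
      have hmem : ∀ (i : Int) (y : String × Int), y ∈ xs.filter (fun p => rk p.1 == i) → rk y.1 = i := by
        intro i y hy
        have := List.of_mem_filter hy
        simpa using this
      rcases rk_mem x.1 with h | h | h | h | h
      · rw [show xs.filter (fun p => rk p.1 == 0) ++ xs.filter (fun p => rk p.1 == 1) ++
              xs.filter (fun p => rk p.1 == 2) ++ xs.filter (fun p => rk p.1 == 3) ++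
              xs.filter (fun p => rk p.1 == 4)
            = xs.filter (fun p => rk p.1 == 0) ++ (xs.filter (fun p => rk p.1 == 1) ++
              (xs.filter (fun p => rk p.1 == 2) ++ (xs.filter (fun p => rk p.1 == 3) ++
              xs.filter (fun p => rk p.1 == 4)))) from by simp [List.append_assoc]]
        rw [insertBy_append_left _ _ _ _ (by
            intro y hy; have := hmem _ _ hy; simp [h, this]),
          insertBy_all_before _ _ _ (by
            intro y hy
            simp only [List.mem_append] at hy
            rcases hy with hy | hy | hy | hy <;>
              · have := hmem _ _ hy; simp [h, this])]
        simp [h, List.filter_append]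
      · rw [show xs.filter (fun p => rk p.1 == 0) ++ xs.filter (fun p => rk p.1 == 1) ++
              xs.filter (fun p => rk p.1 == 2) ++ xs.filter (fun p => rk p.1 == 3) ++
              xs.filter (fun p => rk p.1 == 4)
            = (xs.filter (fun p => rk p.1 == 0) ++ xs.filter (fun p => rk p.1 == 1)) ++
              (xs.filter (fun p => rk p.1 == 2) ++ (xs.filter (fun p => rk p.1 == 3) ++
              xs.filter (fun p => rk p.1 == 4))) from by simp [List.append_assoc]]
        rw [insertBy_append_left _ _ _ _ (by
            intro y hy
            simp only [List.mem_append] at hy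
            rcases hy with hy | hy <;>
              · have := hmem _ _ hy; simp [h, this]),
          insertBy_all_before _ _ _ (by
            intro y hy
            simp only [List.mem_append] at hy
            rcases hy with hy | hy | hy <;>
              · have := hmem _ _ hy; simp [h, this])]
        simp [h, List.filter_append]
      · rw [show xs.filter (fun p => rk p.1 == 0) ++ xs.filter (fun p => rk p.1 == 1) ++
              xs.filter (fun p => rk p.1 == 2) ++ xs.filter (fun p => rk p.1 == 3) ++
              xs.filter (fun p => rk p.1 == 4)
            = (xs.filter (fun p => rk p.1 == 0) ++ xs.filter (fun p => rk p.1 == 1) ++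
              xs.filter (fun p => rk p.1 == 2)) ++ (xs.filter (fun p => rk p.1 == 3) ++
              xs.filter (fun p => rk p.1 == 4)) from by simp [List.append_assoc]]
        rw [insertBy_append_left _ _ _ _ (by
            intro y hy
            simp only [List.mem_append] at hy
            rcases hy with (hy | hy) | hy <;>
              · have := hmem _ _ hy; simp [h, this]),
          insertBy_all_before _ _ _ (by
            intro y hy
            simp only [List.mem_append] at hy
            rcases hy with hy | hy <;>
              · have := hmem _ _ hy; simp [h, this])]
        simp [h, List.filter_append]
      · rw [show xs.filter (fun p => rk p.1 == 0) ++ xs.filter (fun p => rk p.1 == 1) ++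
              xs.filter (fun p => rk p.1 == 2) ++ xs.filter (fun p => rk p.1 == 3) ++
              xs.filter (fun p => rk p.1 == 4)
            = (xs.filter (fun p => rk p.1 == 0) ++ xs.filter (fun p => rk p.1 == 1) ++
              xs.filter (fun p => rk p.1 == 2) ++ xs.filter (fun p => rk p.1 == 3)) ++
              xs.filter (fun p => rk p.1 == 4) from by simp [List.append_assoc]]
        rw [insertBy_append_left _ _ _ _ (by
            intro y hy
            simp only [List.mem_append] at hy
            rcases hy with ((hy | hy) | hy) | hy <;>
              · have := hmem _ _ hy; simp [h, this]),
          insertBy_all_before _ _ _ (by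
            intro y hy; have := hmem _ _ hy; simp [h, this])]
        simp [h, List.filter_append]
      · rw [PySem.List.insertBy_of_forall_not_before _ _ _ (by
            intro y hy
            simp only [List.append_assoc, List.mem_append] at hy
            rcases hy with hy | hy | hy | hy | hy <;>
              · have := hmem _ _ hy; simp [h, this])]
        simp [h, List.filter_append]

-- the (unique) pair of one key, as A's first loop reads it from the dict
def optPair (dA : PySem.Dict String Int) (f : String) : List (String × Int) :=
  match dA.get? f with
  | some v => [(f, v)]
  | none => []

-- with pairwise-distinct keys, the bucket of one key is the dict lookup of that key
lemma filter_eq_key (xs : List (String × Int)) (h : (xs.map Prod.fst).Nodup) (f : String) :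
    xs.filter (fun p => p.1 == f) = optPair (PySem.Dict.mk xs) f := by
  induction xs with
  | nil => simp [optPair, PySem.Dict.get?]
  | cons p t ih =>
      obtain ⟨k, v⟩ := p
      simp only [List.map_cons, List.nodup_cons] at h
      unfold optPair
      rw [PySem.Dict.get?_mk_cons]
      by_cases hp : k = f
      · subst hp
        have ht : t.filter (fun p' => p'.1 == k) = [] := by
          rw [List.filter_eq_nil_iff]
          intro q hq hbq
          exact h.1 (List.mem_map.mpr ⟨q, hq, by simpa using hbq⟩)
        simp [ht]
      · have hb : (k == f) = false := by simp [hp]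
        rw [if_neg (by simp [hb])]
        simp only [List.filter_cons, hb]
        simp only [Bool.false_eq_true, if_false]
        exact ih h.2

lemma loop1_items (dA : PySem.Dict String Int) (fs : List String) (o : PySem.Dict String Int)
    (hfresh : ∀ f ∈ fs, o.contains f = false) (hfs : fs.Nodup) :
    (fs.foldl (fun o f =>
        match dA.get? f with
        | some v => o.insert f v
        | none => o) o).items
      = o.items ++ fs.filterMap (fun f => (dA.get? f).map ((f, ·))) := by
  induction fs generalizing o with
  | nil => simp
  | cons f t ih =>
      simp only [List.nodup_cons] at hfs
      simp only [List.foldl_cons, List.filterMap_cons]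
      cases hget : dA.get? f with
      | none =>
          simp only [Option.map_none]
          exact ih o (fun g hg => hfresh g (by simp [hg])) hfs.2
      | some v =>
          simp only [Option.map_some]
          rw [ih (o.insert f v) (fun g hg => by
            rw [PySem.Dict.contains_insert]
            have : (g == f) = false := by
              simp only [beq_eq_false_iff_ne, ne_eq]
              intro hgf; exact hfs.1 (hgf ▸ hg)
            simp [this, hfresh g (by simp [hg])]) hfs.2]
          rw [PySem.Dict.items_insert_of_not_contains o v (hfresh f (by simp))]
          simp

lemma loop2_items (l : List (String × Int)) (o : PySem.Dict String Int) (c : String × Int → Bool)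
    (hl : (l.map Prod.fst).Nodup) (hc : ∀ p ∈ l, o.contains p.1 = c p) :
    (l.foldl (fun o p => if o.contains p.1 then o else o.insert p.1 p.2) o).items
      = o.items ++ l.filter (fun p => !c p) := by
  induction l generalizing o with
  | nil => simp
  | cons p t ih =>
      simp only [List.map_cons, List.nodup_cons] at hl
      simp only [List.foldl_cons, List.filter_cons]
      have hcp := hc p (by simp)
      by_cases hcpv : c p = true
      · rw [if_pos (hcp.trans hcpv), ih o hl.2 (fun q hq => hc q (by simp [hq]))]
        simp [hcpv]
      · have hcpf : c p = false := by simpa using hcpv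
        rw [if_neg (by simp [hcp, hcpf])]
        rw [ih (o.insert p.1 p.2) hl.2 (fun q hq => by
          rw [PySem.Dict.contains_insert]
          have : (q.1 == p.1) = false := by
            simp only [beq_eq_false_iff_ne, ne_eq]
            intro hqp; exact hl.1 (hqp ▸ List.mem_map_of_mem hq)
          simp [this, hc q (by simp [hq])]),
          PySem.Dict.items_insert_of_not_contains o p.2 (hcp.trans hcpf)]
        simp [hcpf]

lemma items_ofList (l : List (String × Int)) (hl : (l.map Prod.fst).Nodup) :
    (PySem.Dict.ofList l).items = l := by
  have h0 : PySem.Dict.ofList l = l.foldl (fun d a => d.insert a.1 a.2) PySem.Dict.empty := rfl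
  rw [h0, PySem.Dict.items_foldl_insert_fresh _ _ _ _ (by simp [PySem.Dict.contains_empty]) hl]
  simp [PySem.Dict.empty]

lemma map_fst_filterMap (dA : PySem.Dict String Int) (fs : List String) :
    (fs.filterMap (fun f => (dA.get? f).map ((f, ·)))).map Prod.fst
      = fs.filter (fun f => (dA.get? f).isSome) := by
  induction fs with
  | nil => simp
  | cons f t ih =>
      simp only [List.filterMap_cons, List.filter_cons]
      cases hget : dA.get? f <;> simp [ih]

lemma filterMap_std (dA : PySem.Dict String Int) :
    ((["left", "top", "width", "height"] : List String).filterMap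
        (fun f => (dA.get? f).map ((f, ·))))
      = optPair dA "left" ++ optPair dA "top" ++ optPair dA "width" ++ optPair dA "height" := by
  rcases h1 : dA.get? "left" with _ | v1 <;> rcases h2 : dA.get? "top" with _ | v2 <;>
    rcases h3 : dA.get? "width" with _ | v3 <;> rcases h4 : dA.get? "height" with _ | v4 <;>
      simp [optPair, h1, h2, h3, h4]

-- ===== VERDICT (by name: the statement is the Claim_ definition above) =====
theorem preserve_screenshot_area_order_spec : Claim_equal_preserve_screenshot_area_order := by
  intro xs _ hpre
  unfold Pre_preserve_screenshot_area_order at hpre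
  unfold Spec_preserve_screenshot_area_order
  unfold preserve_screenshot_area_order preserve_screenshot_area_order_alt
  simp only []
  -- B's key is rk
  have hkey : (fun item : String × Int =>
      (PySem.Dict.ofList ((PySem.List.enumerate ["left", "top", "width", "height"]).map
        (fun p => (p.2, p.1)))).getD item.1 ((["left", "top", "width", "height"] : List String).length : Int))
      = fun item : String × Int => rk item.1 := funext fun item => rank_getD item.1
  rw [hkey, sorted_buckets xs]
  -- the sorted list still has pairwise-distinct keys
  have hperm : (xs.filter (fun p => rk p.1 == 0) ++ xs.filter (fun p => rk p.1 == 1) ++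
      xs.filter (fun p => rk p.1 == 2) ++ xs.filter (fun p => rk p.1 == 3) ++
      xs.filter (fun p => rk p.1 == 4)).Perm xs := sorted_buckets xs ▸ PySem.List.sorted_perm xs (fun p => rk p.1) false
  have hnd : ((xs.filter (fun p => rk p.1 == 0) ++ xs.filter (fun p => rk p.1 == 1) ++
      xs.filter (fun p => rk p.1 == 2) ++ xs.filter (fun p => rk p.1 == 3) ++
      xs.filter (fun p => rk p.1 == 4)).map Prod.fst).Nodup :=
    ((hperm.map Prod.fst).nodup_iff).mpr hpre
  rw [items_ofList _ hnd]
  -- A's second loop: each key of xs is in the intermediate dict iff it is standard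
  have hfold_keys :
      (((["left", "top", "width", "height"] : List String).foldl (fun o f =>
          match (PySem.Dict.mk xs).get? f with
          | some v => o.insert f v
          | none => o) PySem.Dict.empty)).keys
        = (["left", "top", "width", "height"] : List String).filter
            (fun f => ((PySem.Dict.mk xs).get? f).isSome) := by
    show (((["left", "top", "width", "height"] : List String).foldl (fun o f =>
        match (PySem.Dict.mk xs).get? f with
        | some v => o.insert f v
        | none => o) PySem.Dict.empty)).items.map Prod.fst = _
    rw [loop1_items (PySem.Dict.mk xs) ["left", "top", "width", "height"] PySem.Dict.empty
        (by simp [PySem.Dict.contains_empty]) (by decide)]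
    simp [map_fst_filterMap, PySem.Dict.empty]
  rw [loop2_items xs _ (fun p => decide (p.1 ∈ (["left", "top", "width", "height"] : List String)))
      hpre (by
        intro p hp
        rw [PySem.Dict.contains_eq_decide_mem_keys, hfold_keys]
        have hg : (PySem.Dict.mk xs).get? p.1 = some p.2 :=
          PySem.Dict.get?_of_mem_items (d := PySem.Dict.mk xs) hp hpre
        simp [List.mem_filter, hg])]
  -- A's first loop
  rw [loop1_items (PySem.Dict.mk xs) ["left", "top", "width", "height"] PySem.Dict.empty
      (by simp [PySem.Dict.contains_empty]) (by decide)]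
  rw [filterMap_std]
  -- identify each bucket
  rw [show xs.filter (fun p => rk p.1 == 0) = optPair (PySem.Dict.mk xs) "left" from by
        rw [← filter_eq_key xs hpre]; exact List.filter_congr (fun p _ => rk_eq_zero p.1),
      show xs.filter (fun p => rk p.1 == 1) = optPair (PySem.Dict.mk xs) "top" from by
        rw [← filter_eq_key xs hpre]; exact List.filter_congr (fun p _ => rk_eq_one p.1),
      show xs.filter (fun p => rk p.1 == 2) = optPair (PySem.Dict.mk xs) "width" from by
        rw [← filter_eq_key xs hpre]; exact List.filter_congr (fun p _ => rk_eq_two p.1),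
      show xs.filter (fun p => rk p.1 == 3) = optPair (PySem.Dict.mk xs) "height" from by
        rw [← filter_eq_key xs hpre]; exact List.filter_congr (fun p _ => rk_eq_three p.1),
      show xs.filter (fun p => rk p.1 == 4)
          = xs.filter (fun p => !decide (p.1 ∈ (["left", "top", "width", "height"] : List String))) from
        List.filter_congr (fun p _ => rk_eq_four p.1)]
  simp [PySem.Dict.empty, List.append_assoc]
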